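-- pv_equiv track=rewrite | github.com/gkswns0531/RARE | rare_steps/run_step3_atomic_extraction.py | extract_doc_title
-- ===== SOURCE A (Python) =====
-- def extract_doc_title(chunk_id):
--     parts = chunk_id.split('_')
--     title_parts = []
--     for part in parts:
--         if part.startswith('page') and part[4:].isdigit():
--             break
--         title_parts.append(part)
--     return '_'.join(title_parts).upper() if title_parts else ''
-- ===== SOURCE B (Python) =====
-- def _is_page_token(tok):
--     return tok.startswith('page') and tok[4:].isdigit()
--
-- def extract_doc_title(chunk_id):
--     # Scan underscore-separated tokens in place with partition; no list is built:
--     # the answer is a single slice of the original string, uppercased once.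
--     prefix_len = 0          # chars of chunk_id confirmed as title, incl. trailing '_'
--     rest = chunk_id
--     while True:
--         head, sep, tail = rest.partition('_')
--         if _is_page_token(head):
--             return chunk_id[:prefix_len - 1].upper() if prefix_len else ''
--         if not sep:
--             return chunk_id.upper()
--         prefix_len += len(head) + 1
--         rest = tail
-- ===== Notes on version B (the rewrite author's own statement) =====
-- stated objective: alternative
-- what changed: B replaces A's split-into-parts / accumulate / join-and-uppercase pipeline by an in-place partition scan that tracks only the confirmed prefix length and returns a single slice of the original string uppercased once, building no intermediate list.
import Mathlib
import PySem

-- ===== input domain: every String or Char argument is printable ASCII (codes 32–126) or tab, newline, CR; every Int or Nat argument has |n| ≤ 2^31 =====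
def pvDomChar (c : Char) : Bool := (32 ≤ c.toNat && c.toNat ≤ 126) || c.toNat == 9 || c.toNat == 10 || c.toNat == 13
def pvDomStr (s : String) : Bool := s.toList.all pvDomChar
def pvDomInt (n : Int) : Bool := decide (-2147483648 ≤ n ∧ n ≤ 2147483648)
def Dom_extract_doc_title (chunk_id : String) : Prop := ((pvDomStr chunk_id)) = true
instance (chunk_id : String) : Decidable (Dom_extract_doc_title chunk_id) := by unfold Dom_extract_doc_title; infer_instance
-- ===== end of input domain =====

-- B replaces A's split/collect/join loop by an in-place partition scan that returns one
-- slice of the original string, uppercased once (objective: simpler — no intermediate list).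

-- ===== PORT A =====
-- part.startswith('page') and part[4:].isdigit()
def pvIsPagePart (p : List Char) : Bool :=
  PySem.Chars.startswith p "page".toList && PySem.Chars.strIsdigit (PySem.Chars.slice p (some 4) none)

-- the for-loop with break, accumulating title_parts
def pvALoop : List (List Char) → List (List Char) → List (List Char)
  | [], acc => acc
  | p :: ps, acc => if pvIsPagePart p then acc else pvALoop ps (acc ++ [p])

def extract_doc_title (chunk_id : String) : String :=
  let parts := PySem.Chars.splitOn chunk_id.toList "_".toList
  let title_parts := pvALoop parts []
  if title_parts.isEmpty then ""
  else String.ofList (PySem.Chars.upper (PySem.Chars.join "_".toList title_parts))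

-- ===== PORT B =====
-- tok.startswith('page') and tok[4:].isdigit()
def pvIsPageToken (tok : List Char) : Bool :=
  PySem.Chars.startswith tok "page".toList && PySem.Chars.strIsdigit (PySem.Chars.slice tok (some 4) none)

-- the while loop; rest.partition('_') is (rest.take i, '_', rest.drop (i+1)) at i = rest.find('_'),
-- or (rest, '', '') when find = -1 (exact CPython semantics of str.partition).
-- fuel only makes the recursion structural; it is never exhausted (fuel > rest.length).
def pvBLoop : Nat → List Char → Nat → List Char → List Char
  | 0, _, _, _ => []
  | fuel + 1, cs, prefix_len, rest =>
    let i := PySem.Chars.find rest "_".toList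
    let head := if i = -1 then rest else rest.take i.toNat
    if pvIsPageToken head then
      if prefix_len ≠ 0 then PySem.Chars.upper (cs.take (prefix_len - 1)) else []
    else if i = -1 then PySem.Chars.upper cs
    else pvBLoop fuel cs (prefix_len + head.length + 1) (rest.drop (i.toNat + 1))

def extract_doc_title_alt (chunk_id : String) : String :=
  String.ofList (pvBLoop (chunk_id.toList.length + 1) chunk_id.toList 0 chunk_id.toList)

-- ===== PRECONDITION & SPEC =====
def Spec_extract_doc_title (chunk_id : String) (out : String) : Prop := out = extract_doc_title_alt chunk_id
instance (chunk_id : String) (out : String) : Decidable (Spec_extract_doc_title chunk_id out) := by unfold Spec_extract_doc_title; infer_instance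

-- ===== CLAIM (what is proved, stated in full; the proofs are below) =====
def Claim_equal_extract_doc_title : Prop := ∀ (chunk_id : String), Dom_extract_doc_title chunk_id → Spec_extract_doc_title chunk_id (extract_doc_title chunk_id)

-- ===== LEMMAS AND PROOFS =====

-- reference recursion: the title portion of a suffix; none = its first '_'-part is a page token
def pvR : Nat → List Char → Option (List Char)
  | 0, _ => none
  | fuel + 1, cs =>
    let i := PySem.Chars.find cs "_".toList
    if i = -1 then
      if pvIsPageToken cs then none else some cs
    else
      let head := cs.take i.toNat
      if pvIsPageToken head then none
      else match pvR fuel (cs.drop (i.toNat + 1)) with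
        | none => some head
        | some t => some (head ++ '_' :: t)

-- facts about find on the one-character separator
theorem pvFind_none (rest : List Char) (h : PySem.Chars.find rest ['_'] = -1) :
    '_' ∉ rest := by
  intro hm
  exact ((PySem.Chars.find_eq_neg_one_iff (s := rest) (sub := ['_'])).mp h) ((List.singleton_infix_iff '_' rest).mpr hm)

theorem pvFind_some (rest : List Char) (h : PySem.Chars.find rest ['_'] ≠ -1) :
    (PySem.Chars.find rest ['_']).toNat < rest.length ∧
    rest = rest.take (PySem.Chars.find rest ['_']).toNat ++
      '_' :: rest.drop ((PySem.Chars.find rest ['_']).toNat + 1) ∧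
    '_' ∉ rest.take (PySem.Chars.find rest ['_']).toNat := by
  have h0 : 0 ≤ PySem.Chars.find rest ['_'] := by
    have := PySem.Chars.neg_one_le_find (s := rest) (sub := ['_'])
    omega
  obtain ⟨hpre, hmin⟩ := PySem.Chars.find_spec (s := rest) (sub := ['_']) h0
  set n := (PySem.Chars.find rest ['_']).toNat with hn
  have hlt : n < rest.length := by
    by_contra hge
    rw [List.drop_eq_nil_iff.mpr (by omega)] at hpre
    simp at hpre
  have hget : rest[n] = '_' := by
    have := List.drop_eq_getElem_cons hlt
    rw [this] at hpre
    obtain ⟨t, ht⟩ := hpre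
    have h2 : rest[n]? = some '_' := by simpa using congrArg (·.head?) ht.symm
    simpa [List.getElem?_eq_getElem hlt] using h2
  refine ⟨hlt, ?_, ?_⟩
  · conv_lhs => rw [← List.take_append_drop n rest, List.drop_eq_getElem_cons hlt, hget]
  · intro hmem
    obtain ⟨j, hj, hgj⟩ := List.getElem_of_mem hmem
    have hjlen : (rest.take n).length = min n rest.length := List.length_take
    have hjn : j < n := by omega
    have hjr : j < rest.length := by omega
    apply hmin j hjn
    rw [List.drop_eq_getElem_cons hjr]
    rw [List.getElem_take] at hgj
    rw [hgj]
    exact ⟨_, rfl⟩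

-- Python split('_') (PySem) agrees with Mathlib's List.splitOn
theorem pvSplitOn_cons (c : Char) (rest : List Char) :
    (c :: rest).splitOn '_' =
      if c = '_' then [] :: rest.splitOn '_' else (rest.splitOn '_').modifyHead (c :: ·) := by
  simp [List.splitOn, List.splitOnP_cons]

theorem pvSep_eq : "_".toList = ['_'] := by decide

theorem pvGo_eq (fuel : Nat) : ∀ (l cur : List Char) (acc : List (List Char)),
    l.length < fuel →
    PySem.Chars.splitOn.go ['_'] fuel l cur acc =
      acc.reverse ++ (l.splitOn '_').modifyHead (cur.reverse ++ ·) := by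
  induction fuel with
  | zero => intro l cur acc h; omega
  | succ f ih =>
    intro l cur acc h
    cases l with
    | nil =>
      simp [PySem.Chars.splitOn.go, List.splitOn]
    | cons c rest =>
      by_cases hc : c = '_'
      · subst hc
        rw [PySem.Chars.splitOn.go]
        rw [if_pos (by simp [List.isPrefixOf])]
        rw [ih _ _ _ (by simpa using h)]
        rw [pvSplitOn_cons, if_pos rfl]
        obtain ⟨x, xs, hx⟩ : ∃ x xs, rest.splitOn '_' = x :: xs := by
          rcases hxs : rest.splitOn '_' with _ | ⟨x, xs⟩
          · exact absurd hxs (List.splitOnP_ne_nil _ _)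
          · exact ⟨x, xs, rfl⟩
        simp [hx]
      · rw [PySem.Chars.splitOn.go]
        rw [if_neg (by simp [List.isPrefixOf]; intro hcc; exact hc hcc.symm)]
        rw [ih _ _ _ (by simpa using h)]
        rw [pvSplitOn_cons, if_neg hc]
        obtain ⟨x, xs, hx⟩ : ∃ x xs, rest.splitOn '_' = x :: xs := by
          rcases hxs : rest.splitOn '_' with _ | ⟨x, xs⟩
          · exact absurd hxs (List.splitOnP_ne_nil _ _)
          · exact ⟨x, xs, rfl⟩
        simp [hx]

theorem pvSplit_eq (l : List Char) :
    PySem.Chars.splitOn l ['_'] = l.splitOn '_' := by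
  show PySem.Chars.splitOn.go ['_'] (l.length + 1) l [] [] = _
  rw [pvGo_eq (l.length + 1) l [] [] (by omega)]
  rcases hxs : l.splitOn '_' with _ | ⟨x, xs⟩
  · exact absurd hxs (List.splitOnP_ne_nil _ _)
  · simp

theorem pvSplitOn_not_mem (l : List Char) (h : '_' ∉ l) : l.splitOn '_' = [l] := by
  induction l with
  | nil => rfl
  | cons c t ih =>
    rw [pvSplitOn_cons]
    rw [if_neg (by intro hc; exact h (by simp [hc]))]
    rw [ih (by intro hm; exact h (by simp [hm]))]
    rfl

theorem pvSplitOn_append (a b : List Char) (h : '_' ∉ a) :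
    (a ++ '_' :: b).splitOn '_' = a :: b.splitOn '_' := by
  induction a with
  | nil => simp [pvSplitOn_cons]
  | cons x t ih =>
    have hx : x ≠ '_' := by intro hc; exact h (by simp [hc])
    rw [List.cons_append, pvSplitOn_cons, if_neg hx,
      ih (by intro hm; exact h (by simp [hm]))]
    rfl

theorem pvALoop_eq (parts : List (List Char)) : ∀ acc,
    pvALoop parts acc = acc ++ parts.takeWhile (fun p => !pvIsPageToken p) := by
  induction parts with
  | nil => intro acc; simp [pvALoop]
  | cons p ps ih =>
    intro acc
    have hpe : pvIsPagePart p = pvIsPageToken p := rfl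
    by_cases hp : pvIsPageToken p
    · simp [pvALoop, hpe, List.takeWhile_cons, pvIsPageToken] at *
      simp [hp]
    · simp only [pvALoop, hpe, ih, List.takeWhile_cons, hp]
      simp

-- the reference recursion matches A's takeWhile-of-split view
theorem pvR_split (fuel : Nat) : ∀ (cs : List Char), cs.length < fuel →
    match pvR fuel cs with
    | none => (cs.splitOn '_').takeWhile (fun p => !pvIsPageToken p) = []
    | some t => (cs.splitOn '_').takeWhile (fun p => !pvIsPageToken p) ≠ [] ∧
        PySem.Chars.join ['_'] ((cs.splitOn '_').takeWhile (fun p => !pvIsPageToken p)) = t := by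
  induction fuel with
  | zero => intro cs h; omega
  | succ f ih =>
    intro cs h
    by_cases hi : PySem.Chars.find cs ['_'] = -1
    · have hnm := pvFind_none cs hi
      have hR0 : pvR (f + 1) cs = (if pvIsPageToken cs then none else some cs) := by
        conv_lhs => unfold pvR
        simp only [pvSep_eq]
        rw [if_pos hi]
      rw [pvSplitOn_not_mem cs hnm]
      by_cases hp : pvIsPageToken cs
      · rw [hR0, if_pos hp]
        simp [hp]
      · rw [hR0, if_neg hp]
        refine ⟨by simp [hp], ?_⟩
        simp [hp, PySem.Chars.join_singleton]
    · obtain ⟨hlt, hdec, hnm⟩ := pvFind_some cs hi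
      have hsplit : cs.splitOn '_' =
          (cs.take (PySem.Chars.find cs ['_']).toNat) ::
            (cs.drop ((PySem.Chars.find cs ['_']).toNat + 1)).splitOn '_' := by
        conv_lhs => rw [hdec]
        exact pvSplitOn_append _ _ hnm
      have hblen : (cs.drop ((PySem.Chars.find cs ['_']).toNat + 1)).length < f := by
        rw [List.length_drop]; omega
      have hR : pvR (f + 1) cs =
          (if pvIsPageToken (cs.take (PySem.Chars.find cs ['_']).toNat) then none
           else match pvR f (cs.drop ((PySem.Chars.find cs ['_']).toNat + 1)) with
             | none => some (cs.take (PySem.Chars.find cs ['_']).toNat)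
             | some t => some (cs.take (PySem.Chars.find cs ['_']).toNat ++ '_' :: t)) := by
        conv_lhs => unfold pvR
        simp only [pvSep_eq]
        rw [if_neg hi]
      rw [hR, hsplit]
      by_cases hp : pvIsPageToken (cs.take (PySem.Chars.find cs ['_']).toNat)
      · rw [if_pos hp]
        simp [hp]
      · rw [if_neg hp]
        have hPb := ih _ hblen
        rcases hRb : pvR f (cs.drop ((PySem.Chars.find cs ['_']).toNat + 1)) with _ | t
        · rw [hRb] at hPb
          refine ⟨by simp [hp], ?_⟩
          simp [hp, hPb, PySem.Chars.join_singleton]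
        · rw [hRb] at hPb
          obtain ⟨hne, hj⟩ := hPb
          obtain ⟨x, xs, hx⟩ : ∃ x xs,
              ((cs.drop ((PySem.Chars.find cs ['_']).toNat + 1)).splitOn '_').takeWhile
                (fun p => !pvIsPageToken p) = x :: xs := by
            rcases hxs : ((cs.drop ((PySem.Chars.find cs ['_']).toNat + 1)).splitOn '_').takeWhile
                (fun p => !pvIsPageToken p) with _ | ⟨x, xs⟩
            · exact absurd hxs hne
            · exact ⟨x, xs, rfl⟩
          rw [hx] at hj
          refine ⟨by simp [hp], ?_⟩
          simp only [List.takeWhile_cons, hp, Bool.not_false, if_true, hx]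
          rw [PySem.Chars.join_cons_cons, hj]
          simp

-- the reference recursion matches B's loop
theorem pvBLoop_eq (fuel : Nat) : ∀ (rest pre : List Char), rest.length < fuel →
    pvBLoop fuel (pre ++ rest) pre.length rest =
      PySem.Chars.upper (match pvR fuel rest with
        | none => pre.dropLast
        | some t => pre ++ t) := by
  induction fuel with
  | zero => intro rest pre h; omega
  | succ f ih =>
    intro rest pre h
    have hpage : ∀ (z : List Char), pre.length ≠ 0 →
        (pre ++ z).take (pre.length - 1) = pre.dropLast := by
      intro z hz
      rw [List.take_append_of_le_length (by omega), List.dropLast_eq_take]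
    have hpage0 : pre.length = 0 → pre.dropLast = [] := by
      intro hz
      rw [List.eq_nil_of_length_eq_zero hz]
      rfl
    by_cases hi : PySem.Chars.find rest ['_'] = -1
    · have hB0 : pvBLoop (f + 1) (pre ++ rest) pre.length rest =
          (if pvIsPageToken rest then
            (if pre.length ≠ 0 then PySem.Chars.upper ((pre ++ rest).take (pre.length - 1)) else [])
           else PySem.Chars.upper (pre ++ rest)) := by
        conv_lhs => unfold pvBLoop
        simp only [pvSep_eq]
        rw [if_pos hi, if_pos hi]
      have hR0 : pvR (f + 1) rest = (if pvIsPageToken rest then none else some rest) := by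
        conv_lhs => unfold pvR
        simp only [pvSep_eq]
        rw [if_pos hi]
      rw [hB0, hR0]
      by_cases hp : pvIsPageToken rest
      · rw [if_pos hp, if_pos hp]
        by_cases hz : pre.length = 0
        · simp [hz, hpage0 hz, PySem.Chars.upper]
        · simp [hz, hpage rest hz]
      · rw [if_neg hp, if_neg hp]
    · obtain ⟨hlt, hdec, hnm⟩ := pvFind_some rest hi
      have hblen : (rest.drop ((PySem.Chars.find rest ['_']).toNat + 1)).length < f := by
        rw [List.length_drop]; omega
      have hB : pvBLoop (f + 1) (pre ++ rest) pre.length rest =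
          (if pvIsPageToken (rest.take (PySem.Chars.find rest ['_']).toNat) then
            (if pre.length ≠ 0 then
              PySem.Chars.upper ((pre ++ rest).take (pre.length - 1)) else [])
           else pvBLoop f (pre ++ rest)
              (pre.length + (rest.take (PySem.Chars.find rest ['_']).toNat).length + 1)
              (rest.drop ((PySem.Chars.find rest ['_']).toNat + 1))) := by
        conv_lhs => unfold pvBLoop
        simp only [pvSep_eq]
        rw [if_neg hi, if_neg hi]
      have hR : pvR (f + 1) rest =
          (if pvIsPageToken (rest.take (PySem.Chars.find rest ['_']).toNat) then none
           else match pvR f (rest.drop ((PySem.Chars.find rest ['_']).toNat + 1)) with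
             | none => some (rest.take (PySem.Chars.find rest ['_']).toNat)
             | some t => some (rest.take (PySem.Chars.find rest ['_']).toNat ++ '_' :: t)) := by
        conv_lhs => unfold pvR
        simp only [pvSep_eq]
        rw [if_neg hi]
      rw [hB, hR]
      by_cases hp : pvIsPageToken (rest.take (PySem.Chars.find rest ['_']).toNat)
      · rw [if_pos hp, if_pos hp]
        by_cases hz : pre.length = 0
        · simp [hz, hpage0 hz, PySem.Chars.upper]
        · simp [hz, hpage rest hz]
      · rw [if_neg hp, if_neg hp]
        have hpr : pre ++ rest =
            (pre ++ rest.take (PySem.Chars.find rest ['_']).toNat ++ ['_']) ++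
              rest.drop ((PySem.Chars.find rest ['_']).toNat + 1) := by
          conv_lhs => rw [hdec]
          simp
        have hpl : (pre ++ rest.take (PySem.Chars.find rest ['_']).toNat ++ ['_']).length =
            pre.length + (rest.take (PySem.Chars.find rest ['_']).toNat).length + 1 := by
          simp only [List.length_append, List.length_take, List.length_cons, List.length_nil]
        rw [hpr, ← hpl, ih _ _ hblen]
        rcases hRb : pvR f (rest.drop ((PySem.Chars.find rest ['_']).toNat + 1)) with _ | t
        · rw [List.dropLast_concat]
        · simp

-- ===== VERDICT (by name: the statement is the Claim_ definition above) =====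
theorem extract_doc_title_spec : Claim_equal_extract_doc_title := by
  intro s _
  show extract_doc_title s = extract_doc_title_alt s
  unfold extract_doc_title extract_doc_title_alt
  simp only [pvSep_eq, pvSplit_eq, pvALoop_eq, List.nil_append]
  have hB := pvBLoop_eq (s.toList.length + 1) s.toList [] (by omega)
  simp only [List.nil_append, List.length_nil] at hB
  rw [hB]
  have hP := pvR_split (s.toList.length + 1) s.toList (by omega)
  rcases hR : pvR (s.toList.length + 1) s.toList with _ | t
  · rw [hR] at hP
    simp only at hP
    rw [hP]
    simp [PySem.Chars.upper]
  · rw [hR] at hP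
    simp only at hP
    obtain ⟨hne, hj⟩ := hP
    rw [if_neg (by simpa using hne), hj]
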